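-- pv_equiv track=rewrite | github.com/jayantsolanki/EPIJudgePython | epi_judge_python/8-05-sunset_view.py | examine_buildings_with_sunset_v2
-- ===== SOURCE A (Python) =====
-- from typing import Iterator, List
--
-- def examine_buildings_with_sunset_v2(sequence: Iterator[int]) -> List[int]: #returns the indices
--     candidates = []
--     running_max = float("-Inf")
--     #accesses original index but in reverse
--     for building_idx, building_height in reversed(list(enumerate(sequence))):
--         if building_height > running_max:
--             candidates.append(building_idx)
--             running_max = building_height
--     # return [c for c in reversed(candidates)]
--     return [c for c in candidates]
-- ===== SOURCE B (Python) =====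
-- def examine_buildings_with_sunset_v2(sequence):
--     # Monotonic stack, one left-to-right pass: pop every building blocked by
--     # the current one (height <= current), then push the current building.
--     stack = []  # (index, height), heights strictly decreasing bottom-to-top
--     for idx, height in enumerate(sequence):
--         while stack and stack[-1][1] <= height:
--             stack.pop()
--         stack.append((idx, height))
--     return [idx for idx, _ in reversed(stack)]
-- ===== Notes on version B (the rewrite author's own statement) =====
-- stated objective: alternative
-- what changed: Replaces the reversed running-max scan with the classic left-to-right monotonic-stack sunset algorithm (pop blocked buildings, push current, read the stack back-to-front).
import Mathlib
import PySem

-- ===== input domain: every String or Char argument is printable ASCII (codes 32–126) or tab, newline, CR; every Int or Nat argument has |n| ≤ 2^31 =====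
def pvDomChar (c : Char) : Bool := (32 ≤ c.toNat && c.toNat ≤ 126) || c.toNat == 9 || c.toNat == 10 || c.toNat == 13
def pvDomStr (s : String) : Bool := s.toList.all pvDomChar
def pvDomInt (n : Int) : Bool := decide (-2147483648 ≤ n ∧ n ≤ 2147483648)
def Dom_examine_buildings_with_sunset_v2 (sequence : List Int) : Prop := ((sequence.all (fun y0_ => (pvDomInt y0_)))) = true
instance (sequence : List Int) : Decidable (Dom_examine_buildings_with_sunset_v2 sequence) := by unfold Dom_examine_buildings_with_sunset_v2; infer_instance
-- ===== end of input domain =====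

-- B replaces A's reversed running-max scan by a left-to-right monotonic stack (alternative
-- algorithm of the same cost); return values proved equal on every input.

-- ===== PORT A =====
-- running_max = float("-Inf") is ported as Option Int, none meaning -inf (every Int is > none).
def pvGtO (h : Int) (r : Option Int) : Bool :=
  match r with
  | none => true
  | some m => decide (m < h)

-- one iteration of A's loop body, state = (candidates, running_max)
def pvAStep (st : List Int × Option Int) (b : Int × Int) : List Int × Option Int :=
  if pvGtO b.2 st.2 then (st.1 ++ [b.1], some b.2) else st

def examine_buildings_with_sunset_v2 (sequence : List Int) : List Int :=
  (((PySem.List.enumerate sequence).reverse).foldl pvAStep ([], none)).1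

-- ===== PORT B =====
-- Stack represented with its TOP at the list head (Python appends/pops at the list end);
-- consequently Python's final `reversed(stack)` is the Lean list in its own order.
def pvPopLE (h : Int) : List (Int × Int) → List (Int × Int)
  | [] => []
  | (i, hh) :: rest => if hh ≤ h then pvPopLE h rest else (i, hh) :: rest

-- one iteration of B's loop body: pop all blocked entries, push the current building
def pvBStep (st : List (Int × Int)) (b : Int × Int) : List (Int × Int) :=
  b :: pvPopLE b.2 st

def examine_buildings_with_sunset_v2_alt (sequence : List Int) : List Int :=
  ((PySem.List.enumerate sequence).foldl pvBStep []).map Prod.fst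

-- ===== PRECONDITION & SPEC =====
def Spec_examine_buildings_with_sunset_v2 (sequence : List Int) (out : List Int) : Prop := out = examine_buildings_with_sunset_v2_alt sequence
instance (sequence : List Int) (out : List Int) : Decidable (Spec_examine_buildings_with_sunset_v2 sequence out) := by unfold Spec_examine_buildings_with_sunset_v2; infer_instance

-- ===== CLAIM =====
def Claim_equal_examine_buildings_with_sunset_v2 : Prop := ∀ (sequence : List Int), Dom_examine_buildings_with_sunset_v2 sequence → Spec_examine_buildings_with_sunset_v2 sequence (examine_buildings_with_sunset_v2 sequence)

-- ===== LEMMAS AND PROOFS =====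

-- A's fold over the reversed list, written as structural recursion on the unreversed list
def pvG : List (Int × Int) → List Int × Option Int
  | [] => ([], none)
  | b :: m => pvAStep (pvG m) b

lemma pvG_eq_foldA (m : List (Int × Int)) :
    (m.reverse).foldl pvAStep ([], none) = pvG m := by
  induction m with
  | nil => rfl
  | cons b m ih => simp [List.foldl_append, pvG, ih]

-- characterization of A's running max: it is some maximum element of the processed heights
lemma pvG_snd (m : List (Int × Int)) :
    ((pvG m).2 = none → m = []) ∧
    (∀ v, (pvG m).2 = some v → (∃ x ∈ m, x.2 = v) ∧ ∀ x ∈ m, x.2 ≤ v) := by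
  induction m with
  | nil => simp [pvG]
  | cons b m ih =>
    by_cases h : pvGtO b.2 (pvG m).2 = true
    · refine ⟨by simp [pvG, pvAStep, h], ?_⟩
      intro v hv
      simp [pvG, pvAStep, h] at hv
      subst hv
      refine ⟨⟨b, by simp, rfl⟩, ?_⟩
      intro x hx
      rcases List.mem_cons.1 hx with rfl | hx
      · exact le_refl _
      · cases hr : (pvG m).2 with
        | none => simp [ih.1 hr] at hx
        | some w =>
          have := (ih.2 w hr).2 x hx
          simp [pvGtO, hr] at h
          omega
    · have hstep : pvG (b :: m) = pvG m := by simp [pvG, pvAStep, h]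
      rw [hstep]
      cases hr : (pvG m).2 with
      | none => simp [pvGtO, hr] at h
      | some w =>
        simp [pvGtO, hr] at h
        refine ⟨by simp, ?_⟩
        intro v hv
        injection hv with hv; subst hv
        obtain ⟨⟨x, hx, hxv⟩, hall⟩ := ih.2 w hr
        refine ⟨⟨x, List.mem_cons_of_mem _ hx, hxv⟩, ?_⟩
        intro y hy
        rcases List.mem_cons.1 hy with rfl | hy
        · omega
        · exact hall y hy

lemma pvGtO_iff (m : List (Int × Int)) (h : Int) :
    pvGtO h (pvG m).2 = true ↔ ∀ x ∈ m, x.2 < h := by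
  cases hr : (pvG m).2 with
  | none =>
    have := (pvG_snd m).1 hr
    subst this
    simp [pvGtO]
  | some w =>
    obtain ⟨⟨x, hx, hxv⟩, hall⟩ := (pvG_snd m).2 w hr
    simp only [pvGtO, decide_eq_true_eq]
    constructor
    · intro hw y hy; have := hall y hy; omega
    · intro hy; have := hy x hx; omega

-- "s survives processing of m": its height beats every height in m
def pvSurv (m : List (Int × Int)) (s : Int × Int) : Bool :=
  decide (∀ x ∈ m, x.2 < s.2)

-- popLE keeps exactly the entries of a height-increasing stack that are taller than h
lemma pvPopLE_spec (h : Int) (st : List (Int × Int))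
    (hst : st.Pairwise (fun a b => a.2 < b.2)) :
    (∀ s ∈ pvPopLE h st, h < s.2) ∧
    (pvPopLE h st).Pairwise (fun a b => a.2 < b.2) := by
  induction st with
  | nil => simp [pvPopLE]
  | cons s st ih =>
    obtain ⟨s1, s2⟩ := s
    rw [List.pairwise_cons] at hst
    by_cases hle : s2 ≤ h
    · simpa [pvPopLE, hle] using ih hst.2
    · refine ⟨?_, by rw [pvPopLE]; simp only [if_neg hle]; exact List.pairwise_cons.2 hst⟩
      intro x hx
      rw [pvPopLE] at hx; simp only [if_neg hle] at hx
      rcases List.mem_cons.1 hx with rfl | hx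
      · omega
      · have := hst.1 x hx; simp at this; omega

lemma pvPopLE_filter (m : List (Int × Int)) (h : Int) (st : List (Int × Int))
    (hst : st.Pairwise (fun a b => a.2 < b.2)) :
    (pvPopLE h st).filter (pvSurv m) =
      st.filter (fun s => decide (h < s.2) && pvSurv m s) := by
  induction st with
  | nil => simp [pvPopLE]
  | cons s st ih =>
    obtain ⟨s1, s2⟩ := s
    rw [List.pairwise_cons] at hst
    by_cases hle : s2 ≤ h
    · have : ¬ (h < s2) := by omega
      simp only [pvPopLE, if_pos hle, List.filter_cons]
      simp [this, ih hst.2]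
    · have hlt : h < s2 := by omega
      rw [pvPopLE]; simp only [if_neg hle]
      rw [List.filter_cons, List.filter_cons]
      have htail : st.filter (pvSurv m) =
          st.filter (fun s => decide (h < s.2) && pvSurv m s) := by
        apply List.filter_congr
        intro x hx
        have := hst.1 x hx
        simp at this
        have : h < x.2 := by omega
        simp [this]
      simp only [htail]
      by_cases hs : pvSurv m (s1, s2) = true <;> simp [hs, hlt]

-- survival against (b :: m) splits into beating b and surviving m
lemma pvSurv_cons (b : Int × Int) (m : List (Int × Int)) (s : Int × Int) :
    pvSurv (b :: m) s = (decide (b.2 < s.2) && pvSurv m s) := by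
  by_cases h1 : b.2 < s.2 <;> by_cases h2 : ∀ x ∈ m, x.2 < s.2 <;>
    simp [pvSurv, h1, h2, List.forall_mem_cons]

-- main stack lemma: folding from stack st = folding from [] plus the survivors of st
lemma pvBfold_split (m : List (Int × Int)) :
    ∀ st : List (Int × Int), st.Pairwise (fun a b => a.2 < b.2) →
      m.foldl pvBStep st = m.foldl pvBStep [] ++ st.filter (pvSurv m) := by
  induction m with
  | nil =>
    intro st hst
    simp only [List.foldl_nil, List.nil_append]
    have : ∀ s ∈ st, pvSurv [] s = true := by intro s _; simp [pvSurv]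
    simp [List.filter_eq_self.2 this]
  | cons b m ih =>
    intro st hst
    have hpop := pvPopLE_spec b.2 st hst
    have hpair : (pvBStep st b).Pairwise (fun a c => a.2 < c.2) :=
      List.pairwise_cons.2 ⟨hpop.1, hpop.2⟩
    have hpair1 : (pvBStep ([] : List (Int × Int)) b).Pairwise (fun a c => a.2 < c.2) := by
      simp [pvBStep, pvPopLE]
    calc (b :: m).foldl pvBStep st
        = m.foldl pvBStep (pvBStep st b) := rfl
      _ = m.foldl pvBStep [] ++ (pvBStep st b).filter (pvSurv m) := ih _ hpair
      _ = m.foldl pvBStep [] ++ (pvBStep ([] : List (Int × Int)) b).filter (pvSurv m)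
            ++ st.filter (pvSurv (b :: m)) := by
          rw [List.append_assoc]
          congr 1
          simp only [pvBStep, pvPopLE, List.filter_cons]
          rw [pvPopLE_filter m b.2 st hst]
          have : st.filter (fun s => decide (b.2 < s.2) && pvSurv m s)
              = st.filter (pvSurv (b :: m)) := by
            apply List.filter_congr; intro x _; rw [pvSurv_cons]
          rw [this]
          by_cases hs : pvSurv m b = true <;> simp [hs]
      _ = (b :: m).foldl pvBStep [] ++ st.filter (pvSurv (b :: m)) := by
          congr 1
          have : (b :: m).foldl pvBStep [] = m.foldl pvBStep (pvBStep [] b) := rfl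
          rw [this, ih _ hpair1]

-- the two algorithms compute the same index list, on any enumerated list
lemma pvMain (m : List (Int × Int)) :
    (pvG m).1 = (m.foldl pvBStep []).map Prod.fst := by
  induction m with
  | nil => rfl
  | cons b m ih =>
    have hfold : (b :: m).foldl pvBStep [] =
        m.foldl pvBStep [] ++ [b].filter (pvSurv m) := by
      have h1 : (b :: m).foldl pvBStep [] = m.foldl pvBStep [b] := by
        simp [List.foldl_cons, pvBStep, pvPopLE]
      rw [h1, pvBfold_split m [b] (by simp)]
    rw [hfold]
    by_cases h : pvGtO b.2 (pvG m).2 = true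
    · have hsurv : pvSurv m b = true := by
        simp only [pvSurv, decide_eq_true_eq]
        exact (pvGtO_iff m b.2).1 h
      simp [pvG, pvAStep, h, hsurv, ih]
    · have hsurv : pvSurv m b = false := by
        simp only [pvSurv, decide_eq_false_iff_not]
        intro hc
        exact h ((pvGtO_iff m b.2).2 hc)
      simp [pvG, pvAStep, h, hsurv, ih]

-- ===== VERDICT =====
theorem examine_buildings_with_sunset_v2_spec : Claim_equal_examine_buildings_with_sunset_v2 := by
  intro sequence _
  unfold Spec_examine_buildings_with_sunset_v2
  unfold examine_buildings_with_sunset_v2 examine_buildings_with_sunset_v2_alt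
  rw [pvG_eq_foldA, pvMain]
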